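-- pv_equiv track=rewrite | github.com/noroot777/ui-commander | scripts/intent_fusion.py | _candidate_region_ids
-- ===== SOURCE A (Python) =====
-- def _candidate_region_ids(referential_mentions: list[dict], focus_regions: list[dict], max_regions: int) -> list[int]:
--     ordered: list[int] = []
--     for mention in referential_mentions:
--         candidates = mention.get("region_candidates", []) if isinstance(mention.get("region_candidates"), list) else []
--         for candidate in candidates:
--             region_id = candidate.get("region_id")
--             if isinstance(region_id, int) and region_id not in ordered:
--                 ordered.append(region_id)
--     if len(ordered) >= max_regions:
--         return ordered[:max_regions]
--     for region in focus_regions: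
--         region_id = region.get("region_id")
--         if isinstance(region_id, int) and region_id not in ordered:
--             ordered.append(region_id)
--         if len(ordered) >= max_regions:
--             break
--     return ordered[:max_regions]
-- ===== SOURCE B (Python) =====
-- def _iter_region_ids(referential_mentions, focus_regions):
--     for mention in referential_mentions:
--         candidates = mention.get("region_candidates")
--         if isinstance(candidates, list):
--             for candidate in candidates:
--                 yield candidate.get("region_id")
--     for region in focus_regions:
--         yield region.get("region_id")
--
--
-- def _candidate_region_ids(referential_mentions, focus_regions, max_regions):
--     result = []
--     seen = set()
--     for rid in _iter_region_ids(referential_mentions, focus_regions):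
--         if len(result) >= max_regions:
--             break
--         if isinstance(rid, int) and rid not in seen:
--             seen.add(rid)
--             result.append(rid)
--     return result
-- ===== Notes on version B (the rewrite author's own statement) =====
-- stated objective: alternative
-- what changed: Replaces A's two staged loops (full dedup of mention ids via list membership, a guard, then a break-driven focus loop and slicing) by a single early-terminating pass over one merged id stream (generator), collecting into a result list with a separate seen-set and no slicing.
-- intended difference: For negative max_regions with more distinct mention ids than |max_regions|, A's slice ordered[:max_regions] accidentally returns all but the last |max_regions| collected ids, while B returns [], the intended result when at most a non-positive number of regions is requested. — e.g. on _candidate_region_ids([[("region_candidates", [[("region_id", 1)], [("region_id", 2)]])]], [], -1): A returns [1], B returns []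
import Mathlib
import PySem

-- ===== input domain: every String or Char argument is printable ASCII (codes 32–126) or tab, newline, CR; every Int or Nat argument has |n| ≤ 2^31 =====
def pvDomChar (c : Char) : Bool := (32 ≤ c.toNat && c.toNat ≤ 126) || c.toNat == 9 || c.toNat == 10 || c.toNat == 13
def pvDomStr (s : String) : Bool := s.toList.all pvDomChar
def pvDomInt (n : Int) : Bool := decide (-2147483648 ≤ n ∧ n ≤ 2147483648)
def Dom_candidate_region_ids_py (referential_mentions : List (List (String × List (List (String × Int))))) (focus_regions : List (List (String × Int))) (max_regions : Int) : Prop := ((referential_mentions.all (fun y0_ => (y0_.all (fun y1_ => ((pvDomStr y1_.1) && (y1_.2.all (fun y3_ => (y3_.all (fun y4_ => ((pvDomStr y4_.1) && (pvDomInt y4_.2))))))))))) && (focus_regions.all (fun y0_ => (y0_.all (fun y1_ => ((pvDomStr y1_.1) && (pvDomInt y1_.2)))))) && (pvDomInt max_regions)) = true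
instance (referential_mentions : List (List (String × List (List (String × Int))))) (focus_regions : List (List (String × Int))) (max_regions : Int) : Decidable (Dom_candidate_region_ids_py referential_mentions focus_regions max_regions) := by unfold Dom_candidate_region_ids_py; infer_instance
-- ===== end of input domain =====

-- B replaces A's two staged loops (dedup of mention ids by list membership, a length guard,
-- a break-driven focus loop, and slicing) by ONE early-terminating pass over a merged id
-- stream, collecting into a result list guarded by a separate seen-set (objective: alternative).

-- dict.get(k): first-match lookup in the association list (exact for Python dicts, whose keys are unique)
def pvGet {ν : Type} (d : List (String × ν)) (k : String) : Option ν :=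
  (d.find? (fun p => p.1 == k)).map (·.2)

-- ===== PORT A =====
-- inner candidate step: `if isinstance(region_id, int) and region_id not in ordered: ordered.append(region_id)`
-- (a present "region_id" value is an int by the declared type, so `isinstance` is the `some` case)
def aCandStep (ordered : List Int) (candidate : List (String × Int)) : List Int :=
  match pvGet candidate "region_id" with
  | some rid => if ordered.contains rid then ordered else ordered ++ [rid]
  | none => ordered

-- `for region in focus_regions: …; if len(ordered) >= max_regions: break`
def aFocusLoop (max_regions : Int) (ordered : List Int) : List (List (String × Int)) → List Int
  | [] => ordered
  | region :: rest =>
    if ((aCandStep ordered region).length : Int) ≥ max_regions then aCandStep ordered region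
    else aFocusLoop max_regions (aCandStep ordered region) rest

def candidate_region_ids_py (referential_mentions : List (List (String × List (List (String × Int))))) (focus_regions : List (List (String × Int))) (max_regions : Int) : List Int :=
  -- first loop: `candidates = mention.get("region_candidates", []) if isinstance(…, list) else []`
  let ordered := referential_mentions.foldl
    (fun ordered mention => ((pvGet mention "region_candidates").getD []).foldl aCandStep ordered) []
  if (ordered.length : Int) ≥ max_regions then PySem.List.slice ordered none (some max_regions)
  else PySem.List.slice (aFocusLoop max_regions ordered focus_regions) none (some max_regions)

-- ===== PORT B =====
-- the generator `_iter_region_ids`: every yielded `candidate.get("region_id")` / `region.get("region_id")`, in order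
def bStream (referential_mentions : List (List (String × List (List (String × Int))))) (focus_regions : List (List (String × Int))) : List (Option Int) :=
  referential_mentions.flatMap
    (fun m => ((pvGet m "region_candidates").getD []).map (fun c => pvGet c "region_id"))
  ++ focus_regions.map (fun r => pvGet r "region_id")

-- the single loop of B: break once len(result) >= max_regions, else collect unseen ints
def bLoop (max_regions : Int) (seen : PySem.Set Int) (result : List Int) : List (Option Int) → List Int
  | [] => result
  | rid? :: rest =>
    if (result.length : Int) ≥ max_regions then result
    else
      match rid? with
      | some rid =>
        if seen.contains rid then bLoop max_regions seen result rest
        else bLoop max_regions (seen.add rid) (result ++ [rid]) rest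
      | none => bLoop max_regions seen result rest

def candidate_region_ids_py_alt (referential_mentions : List (List (String × List (List (String × Int))))) (focus_regions : List (List (String × Int))) (max_regions : Int) : List Int :=
  bLoop max_regions ([] : PySem.Set Int) [] (bStream referential_mentions focus_regions)

-- ===== PRECONDITION & SPEC =====
-- the SET of int region_ids present in the mention candidates (a Finset built by key membership;
-- input inspection only, no port code)
def pvIdFinset (referential_mentions : List (List (String × List (List (String × Int))))) : Finset Int :=
  referential_mentions.foldr (fun m s =>
    ((List.lookup "region_candidates" m).getD []).foldr (fun c s' =>
      match List.lookup "region_id" c with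
      | some v => insert v s'
      | none => s') s) ∅

-- For negative max_regions with more distinct mention ids than |max_regions|, A's `ordered[:max_regions]`
-- accidentally returns all but the last |max_regions| collected ids, while B returns [], the intended
-- result when a non-positive number of regions is requested.
def D_candidate_region_ids_py (referential_mentions : List (List (String × List (List (String × Int))))) (focus_regions : List (List (String × Int))) (max_regions : Int) : Prop :=
  max_regions < 0 ∧ 0 < ((pvIdFinset referential_mentions).card : Int) + max_regions
instance (referential_mentions : List (List (String × List (List (String × Int))))) (focus_regions : List (List (String × Int))) (max_regions : Int) : Decidable (D_candidate_region_ids_py referential_mentions focus_regions max_regions) := by unfold D_candidate_region_ids_py; infer_instance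

def Spec_candidate_region_ids_py (referential_mentions : List (List (String × List (List (String × Int))))) (focus_regions : List (List (String × Int))) (max_regions : Int) (out : List Int) : Prop := ¬ D_candidate_region_ids_py referential_mentions focus_regions max_regions → out = candidate_region_ids_py_alt referential_mentions focus_regions max_regions
instance (referential_mentions : List (List (String × List (List (String × Int))))) (focus_regions : List (List (String × Int))) (max_regions : Int) (out : List Int) : Decidable (Spec_candidate_region_ids_py referential_mentions focus_regions max_regions out) := by unfold Spec_candidate_region_ids_py; infer_instance

def pvDiffWitness_candidate_region_ids_py : (List (List (String × List (List (String × Int))))) × (List (List (String × Int))) × Int :=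
  ([[("region_candidates", [[("region_id", 1)], [("region_id", 2)]])]], [], -1)
def pvDiffWitnessOut_candidate_region_ids_py : (List Int) × (List Int) := ([1], [])

-- ===== CLAIM (what is proved, stated in full; the proofs are below) =====
def Claim_unchanged_candidate_region_ids_py : Prop := ∀ (referential_mentions : List (List (String × List (List (String × Int))))) (focus_regions : List (List (String × Int))) (max_regions : Int), Dom_candidate_region_ids_py referential_mentions focus_regions max_regions → Spec_candidate_region_ids_py referential_mentions focus_regions max_regions (candidate_region_ids_py referential_mentions focus_regions max_regions)
def Claim_changed_candidate_region_ids_py : Prop := Dom_candidate_region_ids_py (pvDiffWitness_candidate_region_ids_py.1) (pvDiffWitness_candidate_region_ids_py.2.1) (pvDiffWitness_candidate_region_ids_py.2.2) ∧ D_candidate_region_ids_py (pvDiffWitness_candidate_region_ids_py.1) (pvDiffWitness_candidate_region_ids_py.2.1) (pvDiffWitness_candidate_region_ids_py.2.2) ∧ candidate_region_ids_py (pvDiffWitness_candidate_region_ids_py.1) (pvDiffWitness_candidate_region_ids_py.2.1) (pvDiffWitness_candidate_region_ids_py.2.2) = pvDiffWitnessOut_candidate_region_ids_py.1 ∧ candidate_region_ids_py_alt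 (pvDiffWitness_candidate_region_ids_py.1) (pvDiffWitness_candidate_region_ids_py.2.1) (pvDiffWitness_candidate_region_ids_py.2.2) = pvDiffWitnessOut_candidate_region_ids_py.2 ∧ pvDiffWitnessOut_candidate_region_ids_py.1 ≠ pvDiffWitnessOut_candidate_region_ids_py.2
def Claim_exact_candidate_region_ids_py : Prop := ∀ (referential_mentions : List (List (String × List (List (String × Int))))) (focus_regions : List (List (String × Int))) (max_regions : Int), Dom_candidate_region_ids_py referential_mentions focus_regions max_regions → D_candidate_region_ids_py referential_mentions focus_regions max_regions → candidate_region_ids_py referential_mentions focus_regions max_regions ≠ candidate_region_ids_py_alt referential_mentions focus_regions max_regions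

-- ===== LEMMAS AND PROOFS =====

-- A's conditional append is PySem.Set.add
theorem aCandStep_eq_add (ordered : List Int) (c : List (String × Int)) :
    aCandStep ordered c = match pvGet c "region_id" with
      | some rid => PySem.Set.add ordered rid
      | none => ordered := by
  unfold aCandStep PySem.Set.add PySem.Set.contains
  rfl

-- folding an option-step is folding Set.add over the filterMap
theorem foldl_optStep_eq (cs : List (List (String × Int))) (acc : List Int) :
    cs.foldl aCandStep acc
      = (cs.filterMap (fun c => pvGet c "region_id")).foldl PySem.Set.add acc := by
  induction cs generalizing acc with
  | nil => rfl
  | cons c cs ih =>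
    simp only [List.foldl_cons, List.filterMap_cons, aCandStep_eq_add]
    cases pvGet c "region_id" <;> simp [ih]

-- nested fold over mentions = fold over the flatMap
theorem foldl_mentions_eq (ms : List (List (String × List (List (String × Int))))) (acc : List Int) :
    ms.foldl (fun ordered mention => ((pvGet mention "region_candidates").getD []).foldl aCandStep ordered) acc
      = ((ms.flatMap (fun m => ((pvGet m "region_candidates").getD []).filterMap (fun c => pvGet c "region_id")))).foldl PySem.Set.add acc := by
  induction ms generalizing acc with
  | nil => rfl
  | cons m ms ih =>
    rw [List.foldl_cons, List.flatMap_cons, List.foldl_append, foldl_optStep_eq]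
    exact ih _

theorem phase1_eq (ms : List (List (String × List (List (String × Int))))) :
    ms.foldl (fun ordered mention => ((pvGet mention "region_candidates").getD []).foldl aCandStep ordered) []
      = PySem.List.dedup (ms.flatMap (fun m => ((pvGet m "region_candidates").getD []).filterMap (fun c => pvGet c "region_id"))) := by
  rw [foldl_mentions_eq, PySem.List.dedup_eq_ofList, PySem.Set.ofList_eq_foldl]

-- D_-side helpers and bridge lemmas (proof-only)
def pvMids (ms : List (List (String × List (List (String × Int))))) : List Int :=
  ms.flatMap (fun m => ((pvGet m "region_candidates").getD []).filterMap (fun c => pvGet c "region_id"))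

theorem lookup_eq_pvGet {ν : Type} (c : List (String × ν)) (k : String) : List.lookup k c = pvGet c k := by
  induction c with
  | nil => rfl
  | cons p rest ih =>
    obtain ⟨a, v⟩ := p
    by_cases h : k = a
    · subst h; simp [List.lookup, pvGet, List.find?]
    · have h1 : (k == a) = false := by simp [h]
      have h2 : (a == k) = false := by simp [Ne.symm h]
      simpa [List.lookup, pvGet, List.find?, h1, h2] using ih

theorem foldr_insert_eq (cs : List (List (String × Int))) (s : Finset Int) :
    cs.foldr (fun c s' => match List.lookup "region_id" c with
      | some v => insert v s'
      | none => s') s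
      = (cs.filterMap (fun c => pvGet c "region_id")).toFinset ∪ s := by
  induction cs with
  | nil => simp
  | cons c cs ih =>
    rw [List.foldr_cons, List.filterMap_cons, ← lookup_eq_pvGet]
    cases h : List.lookup "region_id" c <;> simp [h, ih, Finset.insert_union]

theorem pvIdFinset_aux (ms : List (List (String × List (List (String × Int))))) (s : Finset Int) :
    ms.foldr (fun m s =>
      ((List.lookup "region_candidates" m).getD []).foldr (fun c s' =>
        match List.lookup "region_id" c with
        | some v => insert v s'
        | none => s') s) s
      = (pvMids ms).toFinset ∪ s := by
  induction ms generalizing s with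
  | nil => simp [pvMids]
  | cons m ms ih =>
    rw [List.foldr_cons, ih, foldr_insert_eq, lookup_eq_pvGet]
    simp [pvMids, List.toFinset_append, Finset.union_assoc]

theorem card_eq_dedup_length (ms : List (List (String × List (List (String × Int))))) :
    ((pvIdFinset ms).card : Int) = ((PySem.List.dedup (pvMids ms)).length : Int) := by
  have h1 : pvIdFinset ms = (pvMids ms).toFinset := by
    unfold pvIdFinset; rw [pvIdFinset_aux]; simp
  have h2 : (PySem.List.dedup (pvMids ms)).toFinset = (pvMids ms).toFinset := by
    ext x
    simp [PySem.List.dedup_eq_ofList, PySem.Set.mem_ofList]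
  have h3 : (PySem.List.dedup (pvMids ms)).toFinset.card = (PySem.List.dedup (pvMids ms)).length :=
    List.toFinset_card_of_nodup (by rw [PySem.List.dedup_eq_ofList]; exact PySem.Set.nodup_ofList _)
  rw [h1, ← h2, h3]

-- Set.add folding only appends: the fold extends its accumulator
theorem foldl_add_prefix (xs : List Int) (acc : List Int) :
    ∃ t, xs.foldl PySem.Set.add acc = acc ++ t := by
  induction xs generalizing acc with
  | nil => exact ⟨[], by simp⟩
  | cons x xs ih =>
    rcases ih (PySem.Set.add acc x) with ⟨t, ht⟩
    by_cases h : x ∈ acc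
    · exact ⟨t, by simpa [PySem.Set.add_of_mem h] using ht⟩
    · exact ⟨x :: t, by simpa [PySem.Set.add_of_not_mem h] using ht⟩

-- the break in A's focus loop is invisible after truncation to max_regions
theorem aFocusLoop_take (max_regions : Int) (fs : List (List (String × Int))) (acc : List Int)
    (h : (acc.length : Int) < max_regions) :
    (aFocusLoop max_regions acc fs).take max_regions.toNat
      = ((fs.filterMap (fun r => pvGet r "region_id")).foldl PySem.Set.add acc).take max_regions.toNat := by
  induction fs generalizing acc with
  | nil => rfl
  | cons r rest ih =>
    have hlen : (aCandStep acc r).length ≤ acc.length + 1 := by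
      rw [aCandStep_eq_add]
      cases pvGet r "region_id" with
      | none => simp
      | some rid =>
        dsimp only
        by_cases hm : rid ∈ acc
        · simp [PySem.Set.add_of_mem hm]
        · simp [PySem.Set.add_of_not_mem hm]
    have hrhs : ((r :: rest).filterMap (fun r => pvGet r "region_id")).foldl PySem.Set.add acc
        = (rest.filterMap (fun r => pvGet r "region_id")).foldl PySem.Set.add (aCandStep acc r) := by
      rw [aCandStep_eq_add]
      cases hg : pvGet r "region_id" <;> simp [hg]
    unfold aFocusLoop
    by_cases hge : ((aCandStep acc r).length : Int) ≥ max_regions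
    · rw [if_pos hge, hrhs]
      have h1 : (aCandStep acc r).length = max_regions.toNat := by omega
      rcases foldl_add_prefix (rest.filterMap (fun r => pvGet r "region_id")) (aCandStep acc r) with ⟨t, ht⟩
      rw [ht, ← h1, List.take_left, List.take_length]
    · rw [if_neg hge, hrhs]
      exact ih _ (by omega)

-- ordered[:max_regions] with 0 ≤ max_regions is List.take
theorem slice_to_take (xs : List Int) (m : Int) (h : 0 ≤ m) :
    PySem.List.slice xs none (some m) = xs.take m.toNat :=
  PySem.List.slice_to xs h

-- xs[:m] for m < 0 and |m| ≥ len(xs) is empty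
theorem slice_neg_nil (xs : List Int) (m : Int) (hm : m < 0) (h : (xs.length : Int) + m ≤ 0) :
    PySem.List.slice xs none (some m) = [] := by
  have hc : PySem.List.clampIdx xs.length m = 0 := by
    unfold PySem.List.clampIdx; split_ifs <;> omega
  simp [PySem.List.slice, hc]

-- xs[:m] for m < 0 and |m| < len(xs) is nonempty
theorem slice_neg_ne_nil (xs : List Int) (m : Int) (hm : m < 0) (h : 0 < (xs.length : Int) + m) :
    PySem.List.slice xs none (some m) ≠ [] := by
  have hc : PySem.List.clampIdx xs.length m = ((xs.length : Int) + m).toNat := by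
    unfold PySem.List.clampIdx; split_ifs <;> omega
  intro hnil
  simp [PySem.List.slice, hc, List.take_eq_nil_iff] at hnil
  rcases hnil with h1 | h1
  · omega
  · subst h1; simp at h; omega

-- dedup distributes over ++ as a Set.add fold on the deduped prefix
theorem dedup_append (xs ys : List Int) :
    PySem.List.dedup (xs ++ ys) = ys.foldl PySem.Set.add (PySem.List.dedup xs) := by
  rw [PySem.List.dedup_eq_ofList, PySem.Set.ofList_append, PySem.List.dedup_eq_ofList]
  rfl

-- the yielded stream, with the missing-key Nones filtered out, is the two id lists
theorem bStream_filterMap (rm : List (List (String × List (List (String × Int))))) (fr : List (List (String × Int))) :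
    (bStream rm fr).filterMap id
      = rm.flatMap (fun m => ((pvGet m "region_candidates").getD []).filterMap (fun c => pvGet c "region_id"))
        ++ fr.filterMap (fun r => pvGet r "region_id") := by
  simp [bStream, List.filterMap_append, List.filterMap_flatMap, List.filterMap_map, Function.comp]

-- B's loop, with seen = result, is fold-then-truncate (for 0 ≤ max_regions)
theorem bLoop_eq (mx : Int) (h0 : 0 ≤ mx) (stream : List (Option Int)) :
    ∀ res : List Int, res.length ≤ mx.toNat →
    bLoop mx res res stream = ((stream.filterMap id).foldl PySem.Set.add res).take mx.toNat := by
  induction stream with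
  | nil =>
    intro res hres
    simp [bLoop, List.take_of_length_le hres]
  | cons rid? rest ih =>
    intro res hres
    unfold bLoop
    by_cases hge : (res.length : Int) ≥ mx
    · rw [if_pos hge]
      have h1 : res.length = mx.toNat := by omega
      rcases foldl_add_prefix ((rid? :: rest).filterMap id) res with ⟨t, ht⟩
      rw [ht, ← h1, List.take_left]
    · rw [if_neg hge]
      cases rid? with
      | none => simpa using ih res hres
      | some rid =>
        dsimp only
        by_cases hm : rid ∈ res
        · have hc : PySem.Set.contains res rid = true := by
            simpa [PySem.Set.contains] using hm
          rw [hc]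
          simp only [if_true]
          have : (rest.filterMap id).foldl PySem.Set.add (PySem.Set.add res rid)
              = (rest.filterMap id).foldl PySem.Set.add res := by
            rw [PySem.Set.add_of_mem hm]
          simpa [PySem.Set.add_of_mem hm] using ih res hres
        · have hc : PySem.Set.contains res rid = false := by
            simpa [PySem.Set.contains] using hm
          rw [hc]
          simp only [Bool.false_eq_true, if_false]
          have hadd : PySem.Set.add res rid = res ++ [rid] := PySem.Set.add_of_not_mem hm
          have hlen : (res ++ [rid]).length ≤ mx.toNat := by simp; omega
          rw [hadd]
          simpa [hadd] using ih (res ++ [rid]) hlen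

-- B for 0 ≤ max_regions: the first max_regions distinct ids of the merged stream
theorem alt_nonneg (rm : List (List (String × List (List (String × Int))))) (fr : List (List (String × Int))) (mx : Int) (h0 : 0 ≤ mx) :
    candidate_region_ids_py_alt rm fr mx
      = (PySem.List.dedup
          (rm.flatMap (fun m => ((pvGet m "region_candidates").getD []).filterMap (fun c => pvGet c "region_id"))
            ++ fr.filterMap (fun r => pvGet r "region_id"))).take mx.toNat := by
  unfold candidate_region_ids_py_alt
  rw [bLoop_eq mx h0 _ [] (by simp), bStream_filterMap, PySem.List.dedup_eq_ofList, PySem.Set.ofList_eq_foldl]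

-- B for max_regions < 0 stops immediately
theorem alt_neg (rm : List (List (String × List (List (String × Int))))) (fr : List (List (String × Int))) (mx : Int) (h : mx < 0) :
    candidate_region_ids_py_alt rm fr mx = [] := by
  unfold candidate_region_ids_py_alt
  cases bStream rm fr with
  | nil => rfl
  | cons a l =>
    unfold bLoop
    rw [if_pos (by simp; omega)]

-- ===== VERDICT (by name: the statements are the Claim_ definitions above) =====
theorem candidate_region_ids_py_spec : Claim_unchanged_candidate_region_ids_py := by
  intro rm fr mx _
  unfold Spec_candidate_region_ids_py
  intro hnD
  unfold candidate_region_ids_py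
  rw [phase1_eq]
  by_cases h0 : 0 ≤ mx
  · rw [alt_nonneg rm fr mx h0]
    by_cases hge : ((PySem.List.dedup (rm.flatMap (fun m => ((pvGet m "region_candidates").getD []).filterMap (fun c => pvGet c "region_id")))).length : Int) ≥ mx
    · rw [if_pos hge, slice_to_take _ _ h0, dedup_append]
      rcases foldl_add_prefix (fr.filterMap (fun r => pvGet r "region_id"))
        (PySem.List.dedup (rm.flatMap (fun m => ((pvGet m "region_candidates").getD []).filterMap (fun c => pvGet c "region_id")))) with ⟨t, ht⟩
      rw [ht, List.take_append_of_le_length (by omega)]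
    · rw [if_neg hge, slice_to_take _ _ h0, aFocusLoop_take mx fr _ (by omega), dedup_append]
  · have hmx : mx < 0 := by omega
    rw [alt_neg rm fr mx hmx]
    have hk : ((pvIdFinset rm).card : Int) + mx ≤ 0 := by
      by_contra hk
      exact hnD ⟨hmx, by omega⟩
    rw [card_eq_dedup_length] at hk
    rw [if_pos (by omega)]
    exact slice_neg_nil _ _ hmx hk

theorem candidate_region_ids_py_changed : Claim_changed_candidate_region_ids_py := by
  unfold Claim_changed_candidate_region_ids_py; decide

theorem candidate_region_ids_py_tight : Claim_exact_candidate_region_ids_py := by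
  intro rm fr mx _ hD
  rcases hD with ⟨hmx, hk⟩
  rw [card_eq_dedup_length] at hk
  simp only [pvMids] at hk
  rw [alt_neg rm fr mx hmx]
  unfold candidate_region_ids_py
  rw [phase1_eq]
  rw [if_pos (by omega)]
  exact slice_neg_ne_nil _ _ hmx (by omega)
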